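-- pv_equiv track=rewrite | github.com/wangyang96112/QNAsystem | code_for_extracting_tuples.py | tuples_total
-- ===== SOURCE A (Python) =====
-- def tuples_total(column):
--     '''This function tell the total number of triples with in the columns.'''
--     a = []
--     for row in column:
--         a.append(row.split(','))
--     a1 = []
--     for sublist in a:
--         for item in sublist:
--             a1.append(item.strip(' '))
--     return(len(a1))
-- ===== SOURCE B (Python) =====
-- def tuples_total(column):
--     '''This function tell the total number of triples with in the columns.'''
--     return sum(row.count(',') + 1 for row in column)
-- ===== Notes on version B (the rewrite author's own statement) =====
-- stated objective: simpler
-- what changed: B counts comma delimiters per row (k commas = k+1 items) and sums, instead of materialising split lists, flattening them while stripping, and measuring the flat list's length.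
import Mathlib
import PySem

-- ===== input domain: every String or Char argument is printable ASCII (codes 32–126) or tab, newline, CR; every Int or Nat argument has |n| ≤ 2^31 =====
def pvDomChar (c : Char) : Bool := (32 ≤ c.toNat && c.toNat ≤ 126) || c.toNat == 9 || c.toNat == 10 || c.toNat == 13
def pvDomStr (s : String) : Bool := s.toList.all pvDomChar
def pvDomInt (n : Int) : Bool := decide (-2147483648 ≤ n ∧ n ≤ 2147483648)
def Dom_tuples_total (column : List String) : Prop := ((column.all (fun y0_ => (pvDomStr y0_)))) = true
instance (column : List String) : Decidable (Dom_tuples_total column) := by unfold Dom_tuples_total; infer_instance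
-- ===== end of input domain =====

-- B sums per-row (comma count + 1) instead of splitting, stripping and flattening; simpler, same result.

-- ===== PORT A =====
def tuples_total (column : List String) : Int :=
  let a := column.foldl (fun a row => a ++ [(PySem.Str.split? row ",").getD []]) []
  let a1 := a.foldl
    (fun a1 sublist => sublist.foldl (fun a1 item => a1 ++ [PySem.Str.stripChars item " "]) a1) []
  (a1.length : Int)

-- ===== PORT B =====
def tuples_total_alt (column : List String) : Int :=
  column.foldl (fun acc row => acc + ((PySem.Str.count row "," : Int) + 1)) 0

-- ===== PRECONDITION & SPEC =====
def Spec_tuples_total (column : List String) (out : Int) : Prop := out = tuples_total_alt column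
instance (column : List String) (out : Int) : Decidable (Spec_tuples_total column out) := by unfold Spec_tuples_total; infer_instance

-- ===== CLAIM (what is proved, stated in full; the proofs are below) =====
def Claim_equal_tuples_total : Prop := ∀ (column : List String), Dom_tuples_total column → Spec_tuples_total column (tuples_total column)

-- ===== LEMMAS AND PROOFS =====

-- count.go with enough fuel counts occurrences of the single character c.
theorem pv_count_go (c : Char) : ∀ (fuel : Nat) (l : List Char), l.length ≤ fuel →
    ∀ (acc : Nat), PySem.Chars.count.go [c] fuel l acc = acc + l.count c := by
  intro fuel
  induction fuel with
  | zero =>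
      intro l hl acc
      have : l = [] := List.eq_nil_of_length_eq_zero (Nat.le_zero.mp hl)
      subst this
      rw [PySem.Chars.count.go.eq_def]; simp
  | succ n ih =>
      intro l hl acc
      cases l with
      | nil => rw [PySem.Chars.count.go.eq_def]; simp
      | cons h t =>
          rw [PySem.Chars.count.go.eq_def]
          simp only [List.isPrefixOf, Bool.and_true]
          by_cases hc : c = h
          · subst hc
            simp only [beq_self_eq_true, if_true, List.length_cons, List.length_nil,
              List.drop_succ_cons, List.drop_zero]
            rw [ih t (by simpa using hl) (acc + 1), List.count_cons_self]
            omega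
          · have : (c == h) = false := beq_eq_false_iff_ne.mpr hc
            simp only [this, Bool.false_eq_true, if_false]
            rw [ih t (by simpa using hl) acc, List.count_cons_of_ne (by exact fun h' => hc h'.symm)]

-- splitOn.go with enough fuel produces (count of c) + 1 pieces on top of acc.
theorem pv_splitOn_go_len (c : Char) : ∀ (fuel : Nat) (l : List Char), l.length ≤ fuel →
    ∀ (cur : List Char) (acc : List (List Char)),
      (PySem.Chars.splitOn.go [c] fuel l cur acc).length = acc.length + 1 + l.count c := by
  intro fuel
  induction fuel with
  | zero =>
      intro l hl cur acc
      have : l = [] := List.eq_nil_of_length_eq_zero (Nat.le_zero.mp hl)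
      subst this
      rw [PySem.Chars.splitOn.go.eq_def]; simp
  | succ n ih =>
      intro l hl cur acc
      cases l with
      | nil => rw [PySem.Chars.splitOn.go.eq_def]; simp
      | cons h t =>
          rw [PySem.Chars.splitOn.go.eq_def]
          simp only [List.isPrefixOf, Bool.and_true]
          by_cases hc : c = h
          · subst hc
            simp only [beq_self_eq_true, if_true, List.length_cons, List.length_nil,
              List.drop_succ_cons, List.drop_zero]
            rw [ih t (by simpa using hl) [] (cur.reverse :: acc), List.count_cons_self]
            simp; omega
          · have : (c == h) = false := beq_eq_false_iff_ne.mpr hc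
            simp only [this, Bool.false_eq_true, if_false]
            rw [ih t (by simpa using hl) (h :: cur) acc,
              List.count_cons_of_ne (by exact fun h' => hc h'.symm)]

-- one row: the number of comma-separated pieces is the comma count plus one.
theorem pv_split_len (s : String) :
    ((PySem.Str.split? s ",").getD []).length = PySem.Str.count s "," + 1 := by
  have h := PySem.Str.split?_map s ","
  have hsep : (",".toList) = [','] := rfl
  unfold PySem.Chars.split? at h
  rw [hsep] at h
  simp only [List.isEmpty_cons, if_false, Bool.false_eq_true] at h
  cases hs : PySem.Str.split? s "," with
  | none => rw [hs] at h; simp at h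
  | some parts =>
      rw [hs] at h
      simp only [Option.map_some] at h
      have hlen : parts.length = (PySem.Chars.splitOn s.toList [',']).length := by
        have h' := Option.some.inj h
        have := congrArg List.length h'
        simpa using this
      rw [Option.getD_some, hlen]
      unfold PySem.Chars.splitOn
      rw [pv_splitOn_go_len ',' (s.toList.length + 1) s.toList (by omega) [] []]
      unfold PySem.Str.count PySem.Chars.count
      rw [hsep]
      simp only [List.isEmpty_cons, if_false, Bool.false_eq_true]
      rw [pv_count_go ',' s.toList.length s.toList (le_refl _) 0]
      -- count.go counts occurrences of ','; List.count on toList matches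
      simp [List.count]
      omega

-- the inner stripping fold appends one element per item
theorem pv_inner_len (sub : List String) : ∀ (a1 : List String),
    (sub.foldl (fun a1 item => a1 ++ [PySem.Str.stripChars item " "]) a1).length
      = a1.length + sub.length := by
  induction sub with
  | nil => intro a1; simp
  | cons h t ih =>
      intro a1
      rw [List.foldl_cons, ih]
      simp only [List.length_append, List.length_cons, List.length_nil]
      omega

-- the flattening fold's length is the sum of the sublists' lengths
theorem pv_flat_len (subs : List (List String)) : ∀ (a1 : List String),
    (subs.foldl
        (fun a1 sublist => sublist.foldl (fun a1 item => a1 ++ [PySem.Str.stripChars item " "]) a1)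
        a1).length
      = a1.length + (subs.map List.length).sum := by
  induction subs with
  | nil => intro a1; simp
  | cons h t ih =>
      intro a1
      rw [List.foldl_cons, ih, pv_inner_len]
      simp only [List.map_cons, List.sum_cons]
      omega

-- B's fold is the sum of (count + 1) over the rows
theorem pv_alt_sum (cols : List String) : ∀ (acc : Int),
    cols.foldl (fun acc row => acc + ((PySem.Str.count row "," : Int) + 1)) acc
      = acc + ((cols.map (fun row => (PySem.Str.count row "," : Int) + 1)).sum) := by
  induction cols with
  | nil => intro acc; simp
  | cons h t ih => intro acc; rw [List.foldl_cons, ih]; simp; ring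

-- ===== VERDICT (by name: the statement is the Claim_ definition above) =====
theorem tuples_total_spec : Claim_equal_tuples_total := by
  intro column _
  unfold Spec_tuples_total tuples_total tuples_total_alt
  rw [PySem.List.foldl_append_singleton_eq_map]
  simp only [List.nil_append]
  rw [pv_flat_len, pv_alt_sum]
  simp only [List.length_nil, Nat.zero_add, Int.zero_add, List.map_map]
  have hfun : (List.length ∘ fun row => (PySem.Str.split? row ",").getD ([] : List String))
      = fun row => PySem.Str.count row "," + 1 := funext fun r => pv_split_len r
  rw [hfun]
  induction column with
  | nil => simp
  | cons h t ih =>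
      rename_i hd
      have hdt : Dom_tuples_total t := by
        unfold Dom_tuples_total at hd ⊢
        simp only [List.all_cons, Bool.and_eq_true] at hd
        exact hd.2
      have ih' := ih hdt
      simp only [List.map_cons, List.sum_cons]
      push_cast at ih' ⊢
      linear_combination ih'
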